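-- pv_equiv track=rewrite | github.com/LeCastorFou/w40k | regroup.py | regroup_unit
-- ===== SOURCE A (Python) =====
-- def regroup_unit(arr,unitname,Unit):
--     # Find the position of "sm1"
--     sm1_pos = None
--     for i, row in enumerate(arr):
--         for j, val in enumerate(row):
--             if val == f'{unitname}1':
--                 sm1_pos = (i, j)
--                 break
--
--     # If "sm1" not found, return original array
--     if sm1_pos is None:
--         return arr
--
--     # Directions for adjacent positions (up, down, left, right, and diagonals)
--     directions = [
--         (-1, 0), (1, 0), (0, -1), (0, 1),
--         (-1, -1), (-1, 1), (1, -1), (1, 1)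
--     ]
--
--     # Find all "sm" strings and their positions
--     sm_positions = {}
--     for i, row in enumerate(arr):
--         for j, val in enumerate(row):
--             if unitname in val and val != f'{unitname}1':
--                 sm_positions[val] = (i, j)
--
--     # Find the "sm" strings that are not in contact with "sm1"
--     not_in_contact = {}
--     for sm_str, pos in sm_positions.items():
--         i, j = pos
--         if all(arr[i + di][j + dj] != f'{unitname}1' for di, dj in directions if 0 <= i + di < len(arr) and 0 <= j + dj < len(arr[0])):
--             not_in_contact[sm_str] = pos
--
--     # Find closest positions to "sm1" for "sm" strings not in contact with "sm1"
--     for sm_str, pos in not_in_contact.items():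
--         distances = [(abs(sm1_pos[0] - i) + abs(sm1_pos[1] - j), (i, j)) for i in range(len(arr)) for j in range(len(arr[0])) if arr[i][j] == '   ']
--         closest_pos = min(distances, key=lambda x: x[0])[1]
--         arr[closest_pos[0]][closest_pos[1]] = sm_str
--         arr[pos[0]][pos[1]] = '   '
--
--     return arr
-- ===== SOURCE B (Python) =====
-- # B: one combined row-major pass collects sm1, the other markers and a sorted list of
-- # empty cells; each relocation then takes the lex-min (distance, cell) from that list and
-- # updates it incrementally instead of rescanning the whole grid. Mutates arr in place like A.
--
-- DIRECTIONS = [(-1, 0), (1, 0), (0, -1), (0, 1), (-1, -1), (-1, 1), (1, -1), (1, 1)]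
--
--
-- def regroup_unit(arr, unitname, Unit):
--     target = unitname + '1'
--     sm1_pos = None
--     others = {}
--     empties = []  # row-major order == sorted lexicographically; kept sorted throughout
--     for i, row in enumerate(arr):
--         found = None
--         for j, val in enumerate(row):
--             if found is None and val == target:
--                 found = (i, j)
--             if unitname in val and val != target:
--                 others[val] = (i, j)
--             if val == '   ':
--                 empties.append((i, j))
--         if found is not None:
--             sm1_pos = found
--     if sm1_pos is None:
--         return arr
--     si, sj = sm1_pos
--     rows = len(arr)
--     cols = len(arr[0]) if arr else 0
--
--     def touching(i, j):
--         return any(arr[i + di][j + dj] == target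
--                    for di, dj in DIRECTIONS
--                    if 0 <= i + di < rows and 0 <= j + dj < cols)
--
--     movers = [(name, pos) for name, pos in others.items() if not touching(*pos)]
--     for name, (i, j) in movers:
--         # nearest empty cell, ties broken by row-major (i, j) order
--         best = None
--         best_key = None
--         for c in empties:
--             k = (abs(si - c[0]) + abs(sj - c[1]), c)
--             if best_key is None or k < best_key:
--                 best, best_key = c, k
--         empties.remove(best)
--         # free the old cell, keeping empties sorted
--         k = 0
--         while k < len(empties) and empties[k] < (i, j):
--             k += 1
--         empties.insert(k, (i, j))
--         arr[best[0]][best[1]] = name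
--         arr[i][j] = '   '
--     return arr
-- ===== Notes on version B (the rewrite author's own statement) =====
-- stated objective: faster
-- what changed: B replaces A's three separate grid scans and per-marker full-grid distance rescan by one combined row-major pass that also collects a sorted list of empty cells, which is then updated incrementally (remove filled cell, ordered-insert freed cell) while each marker picks the lexicographic minimum of (distance, cell) from that list.
import Mathlib
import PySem

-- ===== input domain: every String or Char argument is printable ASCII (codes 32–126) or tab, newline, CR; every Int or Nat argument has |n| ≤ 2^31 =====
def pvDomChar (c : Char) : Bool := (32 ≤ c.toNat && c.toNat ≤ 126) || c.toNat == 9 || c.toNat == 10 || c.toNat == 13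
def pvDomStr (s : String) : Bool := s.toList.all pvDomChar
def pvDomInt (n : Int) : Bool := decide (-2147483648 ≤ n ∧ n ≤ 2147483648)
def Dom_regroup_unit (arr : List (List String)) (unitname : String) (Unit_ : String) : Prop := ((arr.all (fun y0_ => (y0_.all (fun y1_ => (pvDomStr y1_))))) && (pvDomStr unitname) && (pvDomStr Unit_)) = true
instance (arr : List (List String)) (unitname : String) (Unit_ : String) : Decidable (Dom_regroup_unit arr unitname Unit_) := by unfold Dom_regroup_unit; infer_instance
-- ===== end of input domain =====

-- B replaces A's three separate grid scans and per-marker full-grid rescan by one combined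
-- row-major pass plus an incrementally maintained sorted list of empty cells, so each
-- relocation scans only the empty cells instead of the whole grid (objective: faster).
-- Both Pythons mutate arr in place; the theorems below are about the returned value
-- (which is the same mutated grid).

-- ===== PORT A =====

-- the string literal '   ' (one empty grid cell)
def pvEmptyCell : String := "   "

-- f'{unitname}1' is string concatenation; ported exactly via PySem.Str.join
def pvTarget (u : String) : String := PySem.Str.join "" [u, "1"]

def pvDirections : List (Int × Int) :=
  [(-1, 0), (1, 0), (0, -1), (0, 1), (-1, -1), (-1, 1), (1, -1), (1, 1)]

-- first loop of A: per row the inner 'break' keeps the first match, the outer loop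
-- keeps overwriting, so the last row containing the target wins
def pvFindSm1 (arr : List (List String)) (t : String) : Option (Int × Int) :=
  (PySem.List.enumerate arr 0).foldl (fun acc p =>
    match (PySem.List.enumerate p.2 0).find? (fun q => q.2 == t) with
    | some q => some (p.1, q.1)
    | none => acc) none

def pvSmPositions (arr : List (List String)) (u t : String) : PySem.Dict String (Int × Int) :=
  (PySem.List.enumerate arr 0).foldl (fun d p =>
    (PySem.List.enumerate p.2 0).foldl (fun d q =>
      if PySem.Str.isIn u q.2 && !(q.2 == t) then d.insert q.2 (p.1, q.1) else d) d)
    PySem.Dict.empty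

def pvNoContact (arr : List (List String)) (t : String) (i j : Int) : Bool :=
  pvDirections.all (fun dd =>
    if 0 ≤ i + dd.1 && i + dd.1 < PySem.List.len arr && 0 ≤ j + dd.2 &&
        j + dd.2 < PySem.List.len (PySem.List.pyGetD arr 0 []) then
      !(PySem.List.pyGetD (PySem.List.pyGetD arr (i + dd.1) []) (j + dd.2) "" == t)
    else true)

def pvNotInContact (arr : List (List String)) (t : String)
    (sm : PySem.Dict String (Int × Int)) : PySem.Dict String (Int × Int) :=
  sm.items.foldl (fun d it =>
    if pvNoContact arr t it.2.1 it.2.2 then d.insert it.1 it.2 else d) PySem.Dict.empty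

-- arr[c[0]][c[1]] = v  (both ports perform literally this Python statement)
def pvWriteCell (arr : List (List String)) (c : Int × Int) (v : String) : List (List String) :=
  PySem.List.pySetD arr c.1 (PySem.List.pySetD (PySem.List.pyGetD arr c.1 []) c.2 v)

def pvDistances (arr : List (List String)) (s : Int × Int) : List (Int × (Int × Int)) :=
  (PySem.List.pyRange 0 (PySem.List.len arr) 1).foldl (fun acc i =>
    (PySem.List.pyRange 0 (PySem.List.len (PySem.List.pyGetD arr 0 [])) 1).foldl (fun acc j =>
      if PySem.List.pyGetD (PySem.List.pyGetD arr i []) j "" == pvEmptyCell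
      then acc ++ [(|s.1 - i| + |s.2 - j|, (i, j))] else acc) acc) []

def pvRelocA (t : String) (s : Int × Int) (arr : List (List String))
    (it : String × (Int × Int)) : List (List String) :=
  match PySem.List.min? (pvDistances arr s) (fun x => x.1) with
  | none => arr   -- Python raises ValueError here (min of empty sequence); excluded by Pre_
  | some m => pvWriteCell (pvWriteCell arr m.2 it.1) it.2 pvEmptyCell

def regroup_unit (arr : List (List String)) (unitname : String) (Unit_ : String) :
    List (List String) :=
  match pvFindSm1 arr (pvTarget unitname) with
  | none => arr
  | some s =>
    (pvNotInContact arr (pvTarget unitname)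
        (pvSmPositions arr unitname (pvTarget unitname))).items.foldl
      (pvRelocA (pvTarget unitname) s) arr

-- ===== PORT B =====

-- Python tuple '<' on pairs / (dist, cell) triples of ints, hand-ported (exact lexicographic order)
def pvCellLt (a b : Int × Int) : Bool := a.1 < b.1 || (a.1 == b.1 && a.2 < b.2)
def pvKeyLt (a b : Int × (Int × Int)) : Bool := a.1 < b.1 || (a.1 == b.1 && pvCellLt a.2 b.2)

-- B's single combined pass: (sm1_pos, others, empties)
def pvScan (arr : List (List String)) (u t : String) :
    Option (Int × Int) × PySem.Dict String (Int × Int) × List (Int × Int) :=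
  (PySem.List.enumerate arr 0).foldl (fun st p =>
    let inner := (PySem.List.enumerate p.2 0).foldl (fun st2 q =>
      ((if st2.1.isNone && q.2 == t then some (p.1, q.1) else st2.1),
       (if PySem.Str.isIn u q.2 && !(q.2 == t) then st2.2.1.insert q.2 (p.1, q.1) else st2.2.1),
       (if q.2 == pvEmptyCell then st2.2.2 ++ [(p.1, q.1)] else st2.2.2)))
      (none, st.2.1, st.2.2)
    ((match inner.1 with | some f => some f | none => st.1), inner.2.1, inner.2.2))
    (none, PySem.Dict.empty, [])

def pvTouching (arr : List (List String)) (t : String) (rows cols i j : Int) : Bool :=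
  pvDirections.any (fun dd =>
    0 ≤ i + dd.1 && i + dd.1 < rows && 0 ≤ j + dd.2 && j + dd.2 < cols &&
    PySem.List.pyGetD (PySem.List.pyGetD arr (i + dd.1) []) (j + dd.2) "" == t)

-- B's explicit best/best_key loop (Python min with a tuple key, first minimum)
def pvBestEmpty (s : Int × Int) (empties : List (Int × Int)) : Option (Int × Int) :=
  (empties.foldl (fun acc c =>
    let k : Int × (Int × Int) := (|s.1 - c.1| + |s.2 - c.2|, c)
    match acc with
    | none => some (c, k)
    | some bk => if pvKeyLt k bk.2 then some (c, k) else some bk) none).map (·.1)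

def pvRelocB (t : String) (s : Int × Int)
    (st : List (List String) × List (Int × Int)) (it : String × (Int × Int)) :
    List (List String) × List (Int × Int) :=
  match pvBestEmpty s st.2 with
  | none => st   -- Python raises ValueError here (empties.remove(None)); excluded by Pre_
  | some b =>
    let es1 := match PySem.List.remove? st.2 b with | some l => l | none => st.2
    -- 'k = 0; while k < len(empties) and empties[k] < (i, j): k += 1' counts the sorted
    -- prefix of cells below (i, j); then 'empties.insert(k, (i, j))'
    let es2 := PySem.List.insert es1 (((es1.takeWhile (fun c => pvCellLt c it.2)).length : Int)) it.2
    (pvWriteCell (pvWriteCell st.1 b it.1) it.2 pvEmptyCell, es2)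

def regroup_unit_alt (arr : List (List String)) (unitname : String) (Unit_ : String) :
    List (List String) :=
  let t := pvTarget unitname
  let sc := pvScan arr unitname t
  match sc.1 with
  | none => arr
  | some s =>
    let rows := PySem.List.len arr
    let cols := if arr.isEmpty then 0 else PySem.List.len (PySem.List.pyGetD arr 0 [])
    let movers := sc.2.1.items.filter (fun it => !(pvTouching arr t rows cols it.2.1 it.2.2))
    (movers.foldl (pvRelocB t s) (arr, sc.2.2)).1

-- ===== PRECONDITION & SPEC =====

-- Pre_-side helper: some grid cell holds a non-target marker containing unitname whose
-- whole 3x3 neighbourhood is free of the target marker '<unitname>1'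
def pvLoneMarkerExists (arr : List (List String)) (u : String) : Bool :=
  (List.range arr.length).any (fun i => (List.range (arr.headD []).length).any (fun j =>
    PySem.Str.isIn u ((arr.getD i []).getD j "") &&
    !((arr.getD i []).getD j "" == pvTarget u) &&
    (List.range arr.length).all (fun i' => (List.range (arr.headD []).length).all (fun j' =>
      !(((i' : Int) - (i : Int)).natAbs ≤ 1 && ((j' : Int) - (j : Int)).natAbs ≤ 1 &&
        !(i' == i && j' == j)) ||
      !((arr.getD i' []).getD j' "" == pvTarget u)))))

-- Pre_ excludes, when the target marker '<unitname>1' is present: (a) non-rectangular grids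
-- (A indexes every row by len(arr[0]) and can raise IndexError, and where it happens to
-- return, its neighbour test against the wrong row length is accidental); (b) unit names
-- that are substrings of the empty-cell marker '   ' (empty/space-only names make empty
-- cells themselves count as unit markers, an accident of the substring test); (c) grids
-- with a not-in-contact marker but no empty cell, on which A raises ValueError (min of an
-- empty sequence); the (c) condition quantifies over marker cells, so it also excludes a
-- few grids where only an in-contact duplicate occurrence survives into A's dict and A
-- returns the grid unchanged.
def Pre_regroup_unit (arr : List (List String)) (unitname : String) (Unit_ : String) : Prop :=
  (∃ row ∈ arr, pvTarget unitname ∈ row) →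
    ((∀ row ∈ arr, row.length = (arr.headD []).length) ∧
     PySem.Str.isIn unitname pvEmptyCell = false ∧
     (pvLoneMarkerExists arr unitname = true → ∃ row ∈ arr, pvEmptyCell ∈ row))

instance (arr : List (List String)) (unitname : String) (Unit_ : String) :
    Decidable (Pre_regroup_unit arr unitname Unit_) := by
  unfold Pre_regroup_unit; infer_instance

def pvWitness_regroup_unit : List (List String) × String × String :=
  ([["sm1", "   ", "sm2"]], "sm", "U")

def Spec_regroup_unit (arr : List (List String)) (unitname : String) (Unit_ : String)
    (out : List (List String)) : Prop := out = regroup_unit_alt arr unitname Unit_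
instance (arr : List (List String)) (unitname : String) (Unit_ : String)
    (out : List (List String)) : Decidable (Spec_regroup_unit arr unitname Unit_ out) := by
  unfold Spec_regroup_unit; infer_instance

-- ===== CLAIM (what is proved, stated in full; the proofs are below) =====
def Claim_equal_regroup_unit : Prop := ∀ (arr : List (List String)) (unitname : String) (Unit_ : String), Dom_regroup_unit arr unitname Unit_ → Pre_regroup_unit arr unitname Unit_ → Spec_regroup_unit arr unitname Unit_ (regroup_unit arr unitname Unit_)

-- ===== LEMMAS AND PROOFS =====

-- proof-side abbreviations (not used by the ports)
def pvGetCell (arr : List (List String)) (c : Int × Int) : String :=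
  PySem.List.pyGetD (PySem.List.pyGetD arr c.1 []) c.2 ""

def pvAllCells (R C : Int) : List (Int × Int) :=
  (PySem.List.pyRange 0 R 1).flatMap (fun i => (PySem.List.pyRange 0 C 1).map (fun j => (i, j)))

def pvRectRC (arr : List (List String)) (R C : Int) : Prop :=
  (arr.length : Int) = R ∧ ∀ row ∈ arr, (row.length : Int) = C

def pvEmpties (arr : List (List String)) (R C : Int) : List (Int × Int) :=
  (pvAllCells R C).filter (fun c => pvGetCell arr c == pvEmptyCell)

-- ---- basic facts about the hand-ported tuple orders ----

theorem pvCellLt_irrefl (a : Int × Int) : pvCellLt a a = false := by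
  simp [pvCellLt]

theorem pvCellLt_asymm {a b : Int × Int} (h : pvCellLt a b = true) : pvCellLt b a = false := by
  simp [pvCellLt] at *; omega

theorem pvCellLt_ne {a b : Int × Int} (h : pvCellLt a b = true) : a ≠ b := by
  rintro rfl; simp [pvCellLt_irrefl] at h

-- ---- scan fusion: B's single pass equals A's separate passes ----

def pvEmptyFold (arr : List (List String)) : List (Int × Int) :=
  (PySem.List.enumerate arr 0).foldl (fun es p =>
    (PySem.List.enumerate p.2 0).foldl (fun es q =>
      if q.2 == pvEmptyCell then es ++ [(p.1, q.1)] else es) es) []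

theorem pvScan_row (u t : String) (i : Int) (row : List String) :
    ∀ (k : Int) (f0 : Option (Int × Int)) (d0 : PySem.Dict String (Int × Int))
      (e0 : List (Int × Int)),
    (PySem.List.enumerate row k).foldl (fun st2 (q : Int × String) =>
      ((if st2.1.isNone && q.2 == t then some (i, q.1) else st2.1),
       (if PySem.Str.isIn u q.2 && !(q.2 == t) then st2.2.1.insert q.2 (i, q.1) else st2.2.1),
       (if q.2 == pvEmptyCell then st2.2.2 ++ [(i, q.1)] else st2.2.2))) (f0, d0, e0)
    = ((match f0 with
        | some x => some x
        | none => ((PySem.List.enumerate row k).find? (fun q => q.2 == t)).map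
            (fun q => (i, q.1))),
       (PySem.List.enumerate row k).foldl (fun d q =>
         if PySem.Str.isIn u q.2 && !(q.2 == t) then d.insert q.2 (i, q.1) else d) d0,
       (PySem.List.enumerate row k).foldl (fun es q =>
         if q.2 == pvEmptyCell then es ++ [(i, q.1)] else es) e0) := by
  intro k f0 d0 e0
  induction row generalizing k f0 d0 e0 with
  | nil => cases f0 <;> simp [PySem.List.enumerate]
  | cons x xs ih =>
    rw [PySem.List.enumerate_cons]
    simp only [List.foldl_cons, List.find?_cons]
    rw [ih]
    cases f0 with
    | some v => simp
    | none =>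
      by_cases hx : (x == t) = true
      · simp [hx]
      · simp [hx]

theorem pvScan_eq (arr : List (List String)) (u t : String) :
    pvScan arr u t = (pvFindSm1 arr t, pvSmPositions arr u t, pvEmptyFold arr) := by
  have aux : ∀ (l : List (List String)) (k : Int) (f0 : Option (Int × Int))
      (d0 : PySem.Dict String (Int × Int)) (e0 : List (Int × Int)),
      (PySem.List.enumerate l k).foldl (fun st (p : Int × List String) =>
        let inner := (PySem.List.enumerate p.2 0).foldl (fun st2 (q : Int × String) =>
          ((if st2.1.isNone && q.2 == t then some (p.1, q.1) else st2.1),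
           (if PySem.Str.isIn u q.2 && !(q.2 == t) then st2.2.1.insert q.2 (p.1, q.1) else st2.2.1),
           (if q.2 == pvEmptyCell then st2.2.2 ++ [(p.1, q.1)] else st2.2.2)))
          (none, st.2.1, st.2.2)
        ((match inner.1 with | some f => some f | none => st.1), inner.2.1, inner.2.2))
        (f0, d0, e0)
      = ((PySem.List.enumerate l k).foldl (fun acc p =>
            match (PySem.List.enumerate p.2 0).find? (fun q => q.2 == t) with
            | some q => some (p.1, q.1)
            | none => acc) f0,
         (PySem.List.enumerate l k).foldl (fun d p =>
            (PySem.List.enumerate p.2 0).foldl (fun d q =>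
              if PySem.Str.isIn u q.2 && !(q.2 == t) then d.insert q.2 (p.1, q.1) else d) d) d0,
         (PySem.List.enumerate l k).foldl (fun es p =>
            (PySem.List.enumerate p.2 0).foldl (fun es q =>
              if q.2 == pvEmptyCell then es ++ [(p.1, q.1)] else es) es) e0) := by
    intro l
    induction l with
    | nil => intro k f0 d0 e0; simp [PySem.List.enumerate]
    | cons x xs ih =>
      intro k f0 d0 e0
      rw [PySem.List.enumerate_cons]
      simp only [List.foldl_cons]
      rw [pvScan_row u t k x]
      rw [ih]
      cases h : (PySem.List.enumerate x 0).find? (fun q => q.2 == t) with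
      | some q => simp
      | none => simp
  exact aux arr 0 none PySem.Dict.empty []

-- ---- the empty-cell list as a filter of the row-major cell list ----

theorem pvMem_allCells {R C : Int} {c : Int × Int} :
    c ∈ pvAllCells R C ↔ 0 ≤ c.1 ∧ c.1 < R ∧ 0 ≤ c.2 ∧ c.2 < C := by
  obtain ⟨a, b⟩ := c
  unfold pvAllCells
  simp only [List.mem_flatMap, List.mem_map, PySem.List.mem_pyRange_one, Prod.mk.injEq]
  constructor
  · rintro ⟨i, hi, j, hj, rfl, rfl⟩; exact ⟨hi.1, hi.2, hj.1, hj.2⟩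
  · rintro ⟨h1, h2, h3, h4⟩; exact ⟨a, ⟨h1, h2⟩, b, ⟨h3, h4⟩, rfl, rfl⟩

theorem pvAllCells_pairwise (R C : Int) :
    (pvAllCells R C).Pairwise (fun a b => pvCellLt a b = true) := by
  unfold pvAllCells
  rw [List.pairwise_flatMap]
  constructor
  · intro a _
    refine List.Pairwise.map _ ?_ (PySem.List.pairwise_lt_pyRange_one 0 C)
    intro x y hxy; simp [pvCellLt]; omega
  · refine (PySem.List.pairwise_lt_pyRange_one 0 R).imp ?_
    intro a b hab x hx y hy
    simp only [List.mem_map] at hx hy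
    obtain ⟨j, _, rfl⟩ := hx; obtain ⟨j', _, rfl⟩ := hy
    simp [pvCellLt]; omega

theorem pvAllCells_nodup (R C : Int) : (pvAllCells R C).Nodup := by
  exact (pvAllCells_pairwise R C).imp (fun h => pvCellLt_ne h)

theorem pvEmptyFold_eq {arr : List (List String)} {R C : Int} (h : pvRectRC arr R C) :
    pvEmptyFold arr = pvEmpties arr R C := by
  unfold pvEmptyFold pvEmpties pvAllCells
  rw [PySem.List.foldl_congr_mem (PySem.List.enumerate arr 0)
      (fun es (p : Int × List String) =>
        (PySem.List.enumerate p.2 0).foldl (fun es q =>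
          if q.2 == pvEmptyCell then es ++ [(p.1, q.1)] else es) es)
      (fun es (p : Int × List String) =>
        es ++ ((PySem.List.enumerate p.2 0).filter (fun q => q.2 == pvEmptyCell)).map
          (fun q => (p.1, q.1))) []
      (by intro acc p _; exact PySem.List.foldl_append_if _ _ _ _)]
  rw [PySem.List.foldl_append_eq_flatMap, List.nil_append]
  rw [List.filter_flatMap]
  rw [PySem.List.enumerate_eq_map_pyRange arr []]
  rw [List.flatMap_map]
  simp only [PySem.List.len_eq, h.1]
  apply List.flatMap_congr
  intro i hi
  rw [PySem.List.mem_pyRange_one] at hi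
  have h1 := h.1
  have hrow : PySem.List.pyGetD arr i [] ∈ arr :=
    PySem.List.pyGetD_mem _ _ ⟨by omega, by omega⟩
  have hlen : ((PySem.List.pyGetD arr i []).length : Int) = C := h.2 _ hrow
  have hlen' : PySem.List.len (PySem.List.pyGetD arr i []) = C := by
    simp [PySem.List.len_eq, hlen]
  rw [PySem.List.enumerate_eq_map_pyRange (PySem.List.pyGetD arr i []) "", hlen']
  rw [List.filter_map, List.filter_map, List.map_map]
  simp [Function.comp_def, pvGetCell]

theorem pvDistances_eq {arr : List (List String)} {R C : Int} (s : Int × Int)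
    (h : pvRectRC arr R C) (hR : 0 < R) :
    pvDistances arr s = (pvEmpties arr R C).map (fun c => (|s.1 - c.1| + |s.2 - c.2|, c)) := by
  have h1 := h.1
  have hlen0 : ((PySem.List.pyGetD arr 0 []).length : Int) = C := by
    refine h.2 _ (PySem.List.pyGetD_mem _ _ ⟨by omega, by omega⟩)
  unfold pvDistances pvEmpties pvAllCells
  rw [PySem.List.foldl_congr_mem (PySem.List.pyRange 0 (PySem.List.len arr) 1)
      (fun acc (i : Int) =>
        (PySem.List.pyRange 0 (PySem.List.len (PySem.List.pyGetD arr 0 [])) 1).foldl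
          (fun acc j =>
            if PySem.List.pyGetD (PySem.List.pyGetD arr i []) j "" == pvEmptyCell
            then acc ++ [((|s.1 - i| + |s.2 - j| : Int), (i, j))] else acc) acc)
      (fun acc (i : Int) =>
        acc ++ ((PySem.List.pyRange 0 C 1).filter
            (fun j => PySem.List.pyGetD (PySem.List.pyGetD arr i []) j "" == pvEmptyCell)).map
          (fun j => ((|s.1 - i| + |s.2 - j| : Int), (i, j)))) []
      (by intro acc i _
          simp only [PySem.List.len_eq, hlen0]
          exact PySem.List.foldl_append_if _ _ _ _)]
  rw [PySem.List.foldl_append_eq_flatMap, List.nil_append]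
  rw [List.filter_flatMap, List.map_flatMap]
  simp only [PySem.List.len_eq, h.1]
  apply List.flatMap_congr
  intro i _
  rw [List.filter_map, List.map_map]
  simp [Function.comp_def, pvGetCell]

theorem pvEmpties_pairwise (arr : List (List String)) (R C : Int) :
    (pvEmpties arr R C).Pairwise (fun a b => pvCellLt a b = true) :=
  (pvAllCells_pairwise R C).filter _

theorem pvMem_empties {arr : List (List String)} {R C : Int} {c : Int × Int}
    (h : c ∈ pvEmpties arr R C) :
    (0 ≤ c.1 ∧ c.1 < R ∧ 0 ≤ c.2 ∧ c.2 < C) ∧ pvGetCell arr c = pvEmptyCell := by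
  have h' := List.mem_filter.mp h
  exact ⟨pvMem_allCells.mp h'.1, by simpa using h'.2⟩

-- ---- single-cell updates of the grid ----

theorem pvWriteCell_rect {arr : List (List String)} {R C : Int} (h : pvRectRC arr R C)
    {c : Int × Int} (hb : 0 ≤ c.1 ∧ c.1 < R ∧ 0 ≤ c.2 ∧ c.2 < C) (v : String) :
    pvRectRC (pvWriteCell arr c v) R C := by
  obtain ⟨a, b⟩ := c
  obtain ⟨ha1, ha2, hb1, hb2⟩ := hb
  have h1 := h.1
  constructor
  · simp only [pvWriteCell, PySem.List.length_pySetD]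
    exact h1
  · intro row hrow
    simp only [pvWriteCell] at hrow
    rw [PySem.List.pySetD_of_nonneg _ _ ha1] at hrow
    rcases List.mem_or_eq_of_mem_set hrow with hmem | rfl
    · exact h.2 _ hmem
    · simp only [PySem.List.length_pySetD]
      exact h.2 _ (PySem.List.pyGetD_mem _ _ ⟨by omega, by omega⟩)

theorem pvGetCell_write {arr : List (List String)} {R C : Int} (h : pvRectRC arr R C)
    {c : Int × Int} (hb : 0 ≤ c.1 ∧ c.1 < R ∧ 0 ≤ c.2 ∧ c.2 < C) (v : String)
    {c' : Int × Int} (hb' : 0 ≤ c'.1 ∧ c'.1 < R ∧ 0 ≤ c'.2 ∧ c'.2 < C) :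
    pvGetCell (pvWriteCell arr c v) c' = if c' = c then v else pvGetCell arr c' := by
  obtain ⟨a, b⟩ := c
  obtain ⟨a', b'⟩ := c'
  obtain ⟨ha1, ha2, hb1, hb2⟩ := hb
  obtain ⟨ha1', ha2', hb1', hb2'⟩ := hb'
  have h1 := h.1
  have hrowa : ((PySem.List.pyGetD arr a []).length : Int) = C :=
    h.2 _ (PySem.List.pyGetD_mem _ _ ⟨by omega, by omega⟩)
  simp only [pvGetCell, pvWriteCell]
  have ea : a = ((a.toNat : Nat) : Int) := (Int.toNat_of_nonneg ha1).symm
  have ea' : a' = ((a'.toNat : Nat) : Int) := (Int.toNat_of_nonneg ha1').symm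
  have eb : b = ((b.toNat : Nat) : Int) := (Int.toNat_of_nonneg hb1).symm
  have eb' : b' = ((b'.toNat : Nat) : Int) := (Int.toNat_of_nonneg hb1').symm
  rw [ea, ea', eb, eb']
  rw [ea] at hrowa
  rw [PySem.List.pyGetD_pySetD_natCast _ _ _ _ _ (by omega)]
  by_cases hA : a'.toNat = a.toNat
  · rw [if_pos hA, hA]
    rw [PySem.List.pyGetD_pySetD_natCast _ _ _ _ _ (by omega)]
    by_cases hB : b'.toNat = b.toNat
    · rw [if_pos hB, if_pos (by simp [Prod.ext_iff]; omega)]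
    · rw [if_neg hB, if_neg (by simp [Prod.ext_iff]; omega)]
  · rw [if_neg hA, if_neg (by simp [Prod.ext_iff]; omega)]

-- ---- a filter changing at exactly one cell: erase / sorted insert ----

theorem pvFilter_erase {l : List (Int × Int)} {p q : (Int × Int) → Bool} {c : Int × Int}
    (hnd : l.Nodup) (hc : c ∈ l) (hpc : p c = true) (hqc : q c = false)
    (hagree : ∀ x ∈ l, x ≠ c → q x = p x) :
    l.filter q = (l.filter p).erase c := by
  obtain ⟨l1, l2, rfl⟩ := List.append_of_mem hc
  rw [List.nodup_append] at hnd
  have hc1 : c ∉ l1 := fun hx => hnd.2.2 c hx c (List.mem_cons_self) rfl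
  have hc2 : c ∉ l2 := (List.nodup_cons.mp hnd.2.1).1
  rw [List.filter_append, List.filter_append, List.filter_cons, List.filter_cons, hpc, hqc]
  simp only [Bool.false_eq_true, if_false, if_true]
  have e1 : List.filter q l1 = List.filter p l1 :=
    List.filter_congr (fun x hx => hagree x (List.mem_append_left _ hx)
      (fun hxc => hc1 (hxc ▸ hx)))
  have e2 : List.filter q l2 = List.filter p l2 :=
    List.filter_congr (fun x hx => hagree x
      (List.mem_append_right _ (List.mem_cons_of_mem _ hx)) (fun hxc => hc2 (hxc ▸ hx)))
  rw [e1, e2]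
  rw [List.erase_append_right _ (fun hx => hc1 (List.mem_filter.mp hx).1),
    List.erase_cons_head]

theorem pvFilter_insert {l : List (Int × Int)} {p q : (Int × Int) → Bool} {c : Int × Int}
    (hpw : l.Pairwise (fun a b => pvCellLt a b = true)) (hc : c ∈ l)
    (hpc : p c = false) (hqc : q c = true)
    (hagree : ∀ x ∈ l, x ≠ c → q x = p x) :
    l.filter q = PySem.List.insert (l.filter p)
      ((((l.filter p).takeWhile (fun x => pvCellLt x c)).length : Int)) c := by
  obtain ⟨l1, l2, rfl⟩ := List.append_of_mem hc
  rw [List.pairwise_append] at hpw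
  have hlt1 : ∀ x ∈ l1, pvCellLt x c = true :=
    fun x hx => hpw.2.2 x hx c (List.mem_cons_self)
  have hlt2 : ∀ x ∈ l2, pvCellLt c x = true :=
    fun x hx => (List.pairwise_cons.mp hpw.2.1).1 x hx
  have hne1 : ∀ x ∈ l1, x ≠ c := fun x hx => pvCellLt_ne (hlt1 x hx)
  have hne2 : ∀ x ∈ l2, x ≠ c := fun x hx => (pvCellLt_ne (hlt2 x hx)).symm
  rw [List.filter_append, List.filter_append, List.filter_cons, List.filter_cons, hpc, hqc]
  simp only [Bool.false_eq_true, if_false, if_true]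
  have e1 : List.filter q l1 = List.filter p l1 :=
    List.filter_congr (fun x hx => hagree x (List.mem_append_left _ hx) (hne1 x hx))
  have e2 : List.filter q l2 = List.filter p l2 :=
    List.filter_congr (fun x hx => hagree x
      (List.mem_append_right _ (List.mem_cons_of_mem _ hx)) (hne2 x hx))
  rw [e1, e2]
  have htw1 : (List.filter p l1).takeWhile (fun x => pvCellLt x c) = List.filter p l1 :=
    List.takeWhile_eq_self_iff.mpr (fun x hx => hlt1 x (List.mem_filter.mp hx).1)
  have htw2 : (List.filter p l2).takeWhile (fun x => pvCellLt x c) = [] := by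
    cases hfp : List.filter p l2 with
    | nil => rfl
    | cons y ys =>
      have hy : y ∈ l2 := (List.mem_filter.mp (hfp ▸ List.mem_cons_self)).1
      rw [List.takeWhile_cons, if_neg (by simp [pvCellLt_asymm (hlt2 y hy)])]
  rw [List.takeWhile_append, htw1, if_pos rfl, htw2, List.append_nil]
  rw [PySem.List.insert_natCast _ _ _ (by simp)]
  rw [List.take_left, List.drop_left]

-- ---- A's first-min-by-distance on the sorted list equals B's best/best_key loop ----

def pvStepB (s : Int × Int) (acc : Option ((Int × Int) × (Int × (Int × Int))))
    (c : Int × Int) : Option ((Int × Int) × (Int × (Int × Int))) :=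
  let k : Int × (Int × Int) := (|s.1 - c.1| + |s.2 - c.2|, c)
  match acc with
  | none => some (c, k)
  | some bk => if pvKeyLt k bk.2 then some (c, k) else some bk

def pvStepA (acc : Option (Int × (Int × Int))) (x : Int × (Int × Int)) :
    Option (Int × (Int × Int)) :=
  match acc with
  | none => some x
  | some m => if x.1 < m.1 then some x else some m

theorem pvMin_fold (s : Int × Int) (l : List (Int × Int)) :
    l.Pairwise (fun a b => pvCellLt a b = true) →
    ∀ c0 : Int × Int, (∀ c ∈ l, pvCellLt c0 c = true) →
    ∃ c', (l.foldl (pvStepB s) (some (c0, (|s.1 - c0.1| + |s.2 - c0.2|, c0))))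
          = some (c', (|s.1 - c'.1| + |s.2 - c'.2|, c')) ∧
        ((l.map (fun c => ((|s.1 - c.1| + |s.2 - c.2| : Int), c))).foldl pvStepA
            (some (|s.1 - c0.1| + |s.2 - c0.2|, c0)))
          = some (|s.1 - c'.1| + |s.2 - c'.2|, c') ∧
        (c' = c0 ∨ c' ∈ l) := by
  induction l with
  | nil => exact fun _ c0 _ => ⟨c0, by simp, by simp, Or.inl rfl⟩
  | cons c tl ih =>
    intro hpw c0 hc0
    have hhead := (List.pairwise_cons.mp hpw).1
    have hptl := (List.pairwise_cons.mp hpw).2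
    have hcc0 : pvCellLt c0 c = true := hc0 c List.mem_cons_self
    have hasym : pvCellLt c c0 = false := pvCellLt_asymm hcc0
    simp only [List.foldl_cons, List.map_cons]
    by_cases hd : (|s.1 - c.1| + |s.2 - c.2|) < (|s.1 - c0.1| + |s.2 - c0.2|)
    · have eB : pvStepB s (some (c0, (|s.1 - c0.1| + |s.2 - c0.2|, c0))) c
          = some (c, (|s.1 - c.1| + |s.2 - c.2|, c)) := by
        simp [pvStepB, pvKeyLt, hd]
      have eA : pvStepA (some (|s.1 - c0.1| + |s.2 - c0.2|, c0))
            ((|s.1 - c.1| + |s.2 - c.2| : Int), c)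
          = some (|s.1 - c.1| + |s.2 - c.2|, c) := by
        simp [pvStepA, hd]
      rw [eB, eA]
      obtain ⟨c', h1, h2, h3⟩ := ih hptl c hhead
      exact ⟨c', h1, h2, Or.inr (h3.elim (fun h => h ▸ List.mem_cons_self)
        (fun h => List.mem_cons_of_mem _ h))⟩
    · have eB : pvStepB s (some (c0, (|s.1 - c0.1| + |s.2 - c0.2|, c0))) c
          = some (c0, (|s.1 - c0.1| + |s.2 - c0.2|, c0)) := by
        simp [pvStepB, pvKeyLt, hd, hasym]
      have eA : pvStepA (some (|s.1 - c0.1| + |s.2 - c0.2|, c0))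
            ((|s.1 - c.1| + |s.2 - c.2| : Int), c)
          = some (|s.1 - c0.1| + |s.2 - c0.2|, c0) := by
        simp [pvStepA, hd]
      rw [eB, eA]
      obtain ⟨c', h1, h2, h3⟩ := ih hptl c0 (fun x hx => hc0 x (List.mem_cons_of_mem _ hx))
      exact ⟨c', h1, h2, h3.elim Or.inl (fun h => Or.inr (List.mem_cons_of_mem _ h))⟩

theorem pvMin_eq (s : Int × Int) (l : List (Int × Int))
    (hpw : l.Pairwise (fun a b => pvCellLt a b = true)) :
    (l = [] ∧ pvBestEmpty s l = none ∧
      PySem.List.min? (l.map (fun c => ((|s.1 - c.1| + |s.2 - c.2| : Int), c))) (fun x => x.1)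
        = none) ∨
    (∃ c' ∈ l, pvBestEmpty s l = some c' ∧
      PySem.List.min? (l.map (fun c => ((|s.1 - c.1| + |s.2 - c.2| : Int), c))) (fun x => x.1)
        = some (|s.1 - c'.1| + |s.2 - c'.2|, c')) := by
  cases l with
  | nil => exact Or.inl ⟨rfl, rfl, rfl⟩
  | cons c tl =>
    right
    have hhead := (List.pairwise_cons.mp hpw).1
    have hptl := (List.pairwise_cons.mp hpw).2
    obtain ⟨c', h1, h2, h3⟩ := pvMin_fold s tl hptl c hhead
    refine ⟨c', h3.elim (fun h => h ▸ List.mem_cons_self) (List.mem_cons_of_mem _), ?_, ?_⟩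
    · show ((c :: tl).foldl (pvStepB s) none).map (fun bk => bk.1) = some c'
      rw [List.foldl_cons]
      rw [show pvStepB s none c = some (c, (|s.1 - c.1| + |s.2 - c.2|, c)) from rfl]
      rw [h1]
      rfl
    · unfold PySem.List.min?
      rw [PySem.List.foldl_congr_mem _ _ pvStepA _ (by intro acc x _; cases acc <;> rfl)]
      rw [List.map_cons, List.foldl_cons]
      rw [show pvStepA none ((|s.1 - c.1| + |s.2 - c.2| : Int), c)
          = some ((|s.1 - c.1| + |s.2 - c.2| : Int), c) from rfl]
      rw [h2]

-- ---- the marker dictionary ----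

theorem pvFoldInsertPred {β : Type} (P : String × (Int × Int) → Prop)
    (l : List β) (key : β → String) (val : β → Int × Int) (g : β → Bool) :
    ∀ d : PySem.Dict String (Int × Int), (∀ it ∈ d.items, P it) →
    (∀ b ∈ l, g b = true → P (key b, val b)) →
    ∀ it ∈ (l.foldl (fun d b => if g b then d.insert (key b) (val b) else d) d).items, P it := by
  induction l with
  | nil => exact fun d hd _ => hd
  | cons b bs ih =>
    intro d hd hl
    rw [List.foldl_cons]
    by_cases hg : g b = true
    · rw [if_pos hg]
      refine ih _ ?_ (fun x hx hgx => hl x (List.mem_cons_of_mem _ hx) hgx)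
      intro it hit
      rcases (PySem.Dict.mem_items_insert _ _ _ _).mp hit with h | h
      · exact h ▸ hl b List.mem_cons_self hg
      · exact hd _ h.1
    · rw [if_neg hg]
      exact ih _ hd (fun x hx hgx => hl x (List.mem_cons_of_mem _ hx) hgx)

set_option maxHeartbeats 1000000 in
theorem pvSmPositions_items (arr : List (List String)) (u t : String) :
    ∀ it ∈ (pvSmPositions arr u t).items,
      pvGetCell arr it.2 = it.1 ∧ PySem.Str.isIn u it.1 = true ∧
      0 ≤ it.2.1 ∧ it.2.1 < (arr.length : Int) ∧ 0 ≤ it.2.2 ∧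
      it.2.2 < ((PySem.List.pyGetD arr it.2.1 []).length : Int) := by
  unfold pvSmPositions
  rw [PySem.List.enumerate_eq_map_pyRange arr []]
  refine List.foldlRecOn (motive := fun (d : PySem.Dict String (Int × Int)) => ∀ it ∈ PySem.Dict.items d,
      pvGetCell arr it.2 = it.1 ∧ PySem.Str.isIn u it.1 = true ∧
      0 ≤ it.2.1 ∧ it.2.1 < (arr.length : Int) ∧ 0 ≤ it.2.2 ∧
      it.2.2 < ((PySem.List.pyGetD arr it.2.1 []).length : Int)) _ _
    (fun it hit => nomatch hit) ?_
  intro d hdp a ha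
  simp only [List.mem_map] at ha
  obtain ⟨i, hi, hae⟩ := ha
  rw [PySem.List.mem_pyRange_one] at hi
  simp only [PySem.List.len_eq] at hi
  refine pvFoldInsertPred _ (PySem.List.enumerate a.2 0) (fun q => q.2) (fun q => (a.1, q.1))
    (fun q => PySem.Str.isIn u q.2 && !(q.2 == t)) d hdp ?_
  intro q hq hgq
  rw [PySem.List.mem_enumerate_iff] at hq
  obtain ⟨kk, hkk, rfl⟩ := hq
  have ha1 : a.1 = i := by rw [← hae]
  have ha2 : a.2 = PySem.List.pyGetD arr i [] := by rw [← hae]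
  simp only [Bool.and_eq_true] at hgq
  refine ⟨?_, hgq.1, by simp [ha1]; omega, by simp [ha1]; omega, by simp, ?_⟩
  · show pvGetCell arr (a.1, ((0 : Int) + kk)) = _
    simp only [pvGetCell, zero_add, ha1, ha2]
    rw [PySem.List.pyGetD_natCast]
    rw [ha2] at hkk
    exact List.getD_eq_getElem _ _ hkk
  · show ((0 : Int) + kk) < ((PySem.List.pyGetD arr (a.1, (0 : Int) + kk).1 []).length : Int)
    simp only [zero_add, ha1]
    rw [ha2] at hkk
    exact_mod_cast hkk

theorem pvSmPositions_keys_nodup (arr : List (List String)) (u t : String) :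
    (pvSmPositions arr u t).keys.Nodup := by
  unfold pvSmPositions
  refine List.foldlRecOn (motive := fun (d : PySem.Dict String (Int × Int)) => d.keys.Nodup) _ _ List.nodup_nil ?_
  intro d hdn p _
  have hconv2 := PySem.List.foldl_if_eq_foldl_filter
    (fun (q : Int × String) => PySem.Str.isIn u q.2 && !(q.2 == t))
    (fun d (q : Int × String) => d.insert q.2 (p.1, q.1)) (PySem.List.enumerate p.2 0) d
  simp only [] at hconv2
  rw [hconv2]
  exact PySem.Dict.nodup_keys_foldl_insert_key _ (fun (q : Int × String) => q.2)
    (fun (_ : PySem.Dict String (Int × Int)) (q : Int × String) => (p.1, q.1)) d hdn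

theorem pvItems_pos_nodup {d : PySem.Dict String (Int × Int)} {arr : List (List String)}
    (hk : d.keys.Nodup) (hval : ∀ it ∈ d.items, pvGetCell arr it.2 = it.1) :
    (d.items.map (fun it => it.2)).Nodup := by
  have hk' : (d.items.map (fun it => it.1)).Nodup := hk
  refine List.Nodup.map_on ?_ (List.Nodup.of_map _ hk')
  intro x hx y hy hxy
  have h1 : x.1 = y.1 := by
    rw [← hval x hx, ← hval y hy, hxy]
  have := List.inj_on_of_nodup_map hk' hx hy h1
  exact this

theorem pvNotInContact_items (arr : List (List String)) (t : String)
    (sm : PySem.Dict String (Int × Int)) (hk : sm.keys.Nodup) :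
    (pvNotInContact arr t sm).items
      = sm.items.filter (fun it => pvNoContact arr t it.2.1 it.2.2) := by
  unfold pvNotInContact
  have hconv := PySem.List.foldl_if_eq_foldl_filter
    (fun (it : String × (Int × Int)) => pvNoContact arr t it.2.1 it.2.2)
    (fun d (it : String × (Int × Int)) => d.insert it.1 it.2) sm.items PySem.Dict.empty
  simp only [] at hconv
  rw [hconv]
  have hk2 : (sm.items.map (fun it => it.1)).Nodup := hk
  have hfresh := PySem.Dict.items_foldl_insert_fresh
    (sm.items.filter (fun it => pvNoContact arr t it.2.1 it.2.2))
    (fun it => it.1) (fun it => it.2) PySem.Dict.empty (fun a _ => rfl)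
    (List.Nodup.sublist (List.Sublist.map _ List.filter_sublist) hk2)
  simp only [] at hfresh
  rw [hfresh]
  simp [show (PySem.Dict.empty : PySem.Dict String (Int × Int)).items = [] from rfl]

-- ---- A's all-neighbours test is the negation of B's touching test ----

theorem pvNoContact_eq (arr : List (List String)) (t : String) (i j : Int) :
    pvNoContact arr t i j
      = !(pvTouching arr t (PySem.List.len arr)
            (PySem.List.len (PySem.List.pyGetD arr 0 [])) i j) := by
  unfold pvNoContact pvTouching
  rw [List.all_eq_not_any_not]
  congr 1
  refine PySem.List.any_congr_mem ?_
  intro dd _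
  rw [show ∀ (C E : Bool), (!(if C then !E else true)) = (C && E) from by decide]

-- ---- the target marker is in the grid when the first pass finds it ----

theorem pvFindSm1_some {arr : List (List String)} {t : String} {s : Int × Int}
    (h : pvFindSm1 arr t = some s) : ∃ row ∈ arr, t ∈ row := by
  have haux : (pvFindSm1 arr t).isSome → ∃ row ∈ arr, t ∈ row := by
    unfold pvFindSm1
    refine List.foldlRecOn (motive := fun (o : Option (Int × Int)) =>
      o.isSome → ∃ row ∈ arr, t ∈ row) _ _ (by simp) ?_
    intro o ho p hp
    cases hfind : (PySem.List.enumerate p.2 0).find? (fun q => q.2 == t) with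
    | none => simpa [hfind] using ho
    | some q =>
      intro _
      rw [PySem.List.mem_enumerate_iff] at hp
      obtain ⟨k, hk, rfl⟩ := hp
      refine ⟨arr[k], List.getElem_mem _, ?_⟩
      have hqmem := List.mem_of_find?_eq_some hfind
      have hqt := List.find?_some hfind
      rw [PySem.List.mem_enumerate_iff] at hqmem
      obtain ⟨k2, hk2, rfl⟩ := hqmem
      have : arr[k][k2] = t := by simpa using hqt
      exact this ▸ List.getElem_mem _
  exact haux (h ▸ rfl)

-- ---- the relocation loops agree ----

theorem pvLoop (t : String) (sm1 : Int × Int) (R C : Int)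
    (L : List (String × (Int × Int))) :
    ∀ (arr : List (List String)), 0 < R → pvRectRC arr R C →
    (∀ it ∈ L, (0 ≤ it.2.1 ∧ it.2.1 < R ∧ 0 ≤ it.2.2 ∧ it.2.2 < C) ∧
      pvGetCell arr it.2 = it.1 ∧ it.1 ≠ pvEmptyCell) →
    (L.map (fun it => it.2)).Nodup →
    L.foldl (pvRelocA t sm1) arr = (L.foldl (pvRelocB t sm1) (arr, pvEmpties arr R C)).1 := by
  induction L with
  | nil => intro arr _ _ _ _; rfl
  | cons it L ih =>
    intro arr hR hrect hinv hnd
    have hndc : (it.2 :: L.map (fun it => it.2)).Nodup := by simpa using hnd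
    have hnd2 : (L.map (fun it => it.2)).Nodup := (List.nodup_cons.mp hndc).2
    have hnotin : it.2 ∉ L.map (fun it => it.2) := (List.nodup_cons.mp hndc).1
    have hit := hinv it List.mem_cons_self
    have hpwE := pvEmpties_pairwise arr R C
    have hd := pvDistances_eq sm1 hrect hR
    rw [List.foldl_cons, List.foldl_cons]
    rcases pvMin_eq sm1 (pvEmpties arr R C) hpwE with ⟨hnil, hbe, hmin⟩ |
      ⟨b, hbmem, hbe, hmin⟩
    · have hA : pvRelocA t sm1 arr it = arr := by
        unfold pvRelocA; rw [hd, hmin]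
      have hB : pvRelocB t sm1 (arr, pvEmpties arr R C) it = (arr, pvEmpties arr R C) := by
        unfold pvRelocB; rw [hbe]
      rw [hA, hB]
      exact ih arr hR hrect (fun x hx => hinv x (List.mem_cons_of_mem _ hx)) hnd2
    · obtain ⟨hbI, hbEmpty⟩ := pvMem_empties hbmem
      have hb_ne_p : it.2 ≠ b := by
        intro he
        apply hit.2.2
        rw [← hit.2.1, he, hbEmpty]
      have hrect1 := pvWriteCell_rect hrect hbI it.1
      have hrect2 := pvWriteCell_rect hrect1 hit.1 pvEmptyCell
      have hA : pvRelocA t sm1 arr it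
          = pvWriteCell (pvWriteCell arr b it.1) it.2 pvEmptyCell := by
        unfold pvRelocA; rw [hd, hmin]
      have hg1self : pvGetCell (pvWriteCell arr b it.1) b = it.1 := by
        rw [pvGetCell_write hrect hbI it.1 hbI, if_pos rfl]
      have hg1other : ∀ x : Int × Int, (0 ≤ x.1 ∧ x.1 < R ∧ 0 ≤ x.2 ∧ x.2 < C) → x ≠ b →
          pvGetCell (pvWriteCell arr b it.1) x = pvGetCell arr x := by
        intro x hx hxb
        rw [pvGetCell_write hrect hbI it.1 hx, if_neg hxb]
      have hg2self : pvGetCell (pvWriteCell (pvWriteCell arr b it.1) it.2 pvEmptyCell) it.2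
          = pvEmptyCell := by
        rw [pvGetCell_write hrect1 hit.1 pvEmptyCell hit.1, if_pos rfl]
      have hg2other : ∀ x : Int × Int, (0 ≤ x.1 ∧ x.1 < R ∧ 0 ≤ x.2 ∧ x.2 < C) → x ≠ it.2 →
          pvGetCell (pvWriteCell (pvWriteCell arr b it.1) it.2 pvEmptyCell) x
            = pvGetCell (pvWriteCell arr b it.1) x := by
        intro x hx hxp
        rw [pvGetCell_write hrect1 hit.1 pvEmptyCell hx, if_neg hxp]
      have hfe : pvEmpties (pvWriteCell arr b it.1) R C = (pvEmpties arr R C).erase b := by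
        refine pvFilter_erase (pvAllCells_nodup R C) (pvMem_allCells.mpr hbI) ?_ ?_ ?_
        · simp [hbEmpty]
        · rw [hg1self]
          simp [hit.2.2]
        · intro x hx hxb
          rw [hg1other x (pvMem_allCells.mp hx) hxb]
      have hp1_ne : pvGetCell (pvWriteCell arr b it.1) it.2 = it.1 := by
        rw [hg1other it.2 hit.1 hb_ne_p, hit.2.1]
      have hfi : pvEmpties (pvWriteCell (pvWriteCell arr b it.1) it.2 pvEmptyCell) R C
          = PySem.List.insert (pvEmpties (pvWriteCell arr b it.1) R C)
              ((((pvEmpties (pvWriteCell arr b it.1) R C).takeWhile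
                (fun c => pvCellLt c it.2)).length : Int)) it.2 := by
        refine pvFilter_insert (pvAllCells_pairwise R C) (pvMem_allCells.mpr hit.1) ?_ ?_ ?_
        · simp [hp1_ne, hit.2.2]
        · simp [hg2self]
        · intro x hx hxp
          rw [hg2other x (pvMem_allCells.mp hx) hxp]
      rw [hfe] at hfi
      have hB : pvRelocB t sm1 (arr, pvEmpties arr R C) it
          = (pvWriteCell (pvWriteCell arr b it.1) it.2 pvEmptyCell,
             pvEmpties (pvWriteCell (pvWriteCell arr b it.1) it.2 pvEmptyCell) R C) := by
        unfold pvRelocB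
        rw [hbe]
        simp only []
        rw [PySem.List.remove?_eq_some_erase _ _ hbmem]
        simp only []
        rw [← hfi]
      rw [hA, hB]
      refine ih _ hR hrect2 ?_ hnd2
      intro it' hit'
      have h3 := hinv it' (List.mem_cons_of_mem _ hit')
      have hne1 : it'.2 ≠ it.2 := by
        intro he
        exact hnotin (he ▸ List.mem_map_of_mem hit')
      have hne2 : it'.2 ≠ b := by
        intro he
        apply h3.2.2
        rw [← h3.2.1, he, hbEmpty]
      refine ⟨h3.1, ?_, h3.2.2⟩
      rw [hg2other it'.2 h3.1 hne1, hg1other it'.2 h3.1 hne2]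
      exact h3.2.1
  

theorem regroup_unit_spec : Claim_equal_regroup_unit := by
  intro arr u U _hdom hpre
  unfold Spec_regroup_unit
  cases h : pvFindSm1 arr (pvTarget u) with
  | none =>
    simp [regroup_unit, regroup_unit_alt, pvScan_eq, h]
  | some s =>
    have hex : ∃ row ∈ arr, pvTarget u ∈ row := pvFindSm1_some h
    obtain ⟨hrectN, hspace, _⟩ := hpre hex
    have harrne : arr ≠ [] := by
      rcases hex with ⟨row, hrow, _⟩
      exact List.ne_nil_of_mem hrow
    have hR : 0 < (arr.length : Int) := by
      have := List.length_pos_of_ne_nil harrne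
      omega
    have hrect : pvRectRC arr (arr.length : Int) ((arr.headD []).length : Int) :=
      ⟨rfl, fun row hrow => by exact_mod_cast congrArg Nat.cast (hrectN row hrow)⟩
    have hkeys := pvSmPositions_keys_nodup arr u (pvTarget u)
    have hitems := pvSmPositions_items arr u (pvTarget u)
    have hnic := pvNotInContact_items arr (pvTarget u) (pvSmPositions arr u (pvTarget u)) hkeys
    have hposnd := pvItems_pos_nodup hkeys (fun it hit => (hitems it hit).1)
    have hfilter_eq : ((pvSmPositions arr u (pvTarget u)).items.filter
          (fun it => pvNoContact arr (pvTarget u) it.2.1 it.2.2))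
        = ((pvSmPositions arr u (pvTarget u)).items.filter
          (fun it => !(pvTouching arr (pvTarget u) (PySem.List.len arr)
            (PySem.List.len (PySem.List.pyGetD arr 0 [])) it.2.1 it.2.2))) :=
      List.filter_congr (fun it _ => pvNoContact_eq arr (pvTarget u) it.2.1 it.2.2)
    have hempty_false : arr.isEmpty = false := by
      simpa [List.isEmpty_iff] using harrne
    simp only [regroup_unit, regroup_unit_alt, pvScan_eq, h, hempty_false]
    rw [hnic, hfilter_eq, pvEmptyFold_eq hrect]
    set movers := ((pvSmPositions arr u (pvTarget u)).items.filter
      (fun it => !(pvTouching arr (pvTarget u) (PySem.List.len arr)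
        (PySem.List.len (PySem.List.pyGetD arr 0 [])) it.2.1 it.2.2))) with hmovers
    refine pvLoop (pvTarget u) s (arr.length : Int) ((arr.headD []).length : Int)
      movers arr hR hrect ?_ ?_
    · intro it hit
      have hmem : it ∈ (pvSmPositions arr u (pvTarget u)).items :=
        (List.mem_filter.mp hit).1
      obtain ⟨hget, hisin, hb1, hb2, hb3, hb4⟩ := hitems it hmem
      have hrowC : ((PySem.List.pyGetD arr it.2.1 []).length : Int)
          = ((arr.headD []).length : Int) :=
        hrect.2 _ (PySem.List.pyGetD_mem _ _ ⟨by omega, by omega⟩)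
      refine ⟨⟨hb1, hb2, hb3, by omega⟩, hget, ?_⟩
      intro he
      rw [he] at hisin
      rw [hisin] at hspace
      simp at hspace
    · exact List.Nodup.sublist (List.Sublist.map _ List.filter_sublist) hposnd
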